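-- pv_equiv track=rewrite | github.com/BOWENmeZHENG/compute_structure | utils.py | list_atoms
-- ===== SOURCE A (Python) =====
-- def list_atoms(frame: list):
--     O_CO2_list = []  # list of CO2 O atoms
--     C_CO2 = None
--     Mg_list = []  # list of Mg atoms
--     for atom in frame:
--         if atom[1] == 6:
--             O_CO2_list.append(atom)
--         if atom[1] == 5:
--             C_CO2 = atom
--         if atom[1] == 1:
--             Mg_list.append(atom)
--     return O_CO2_list, C_CO2, Mg_list
-- ===== SOURCE B (Python) =====
-- def list_atoms(frame: list):
--     groups = {}
--     for atom in frame:
--         groups.setdefault(atom[1], []).append(atom)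
--     O_CO2_list = groups.get(6, [])
--     C_CO2 = groups[5][-1] if 5 in groups else None
--     Mg_list = groups.get(1, [])
--     return O_CO2_list, C_CO2, Mg_list
-- ===== Notes on version B (the rewrite author's own statement) =====
-- stated objective: alternative
-- what changed: Replaces the three per-category if-branches and mutable accumulators by a branch-free grouping pass into a dict keyed by atomic number (setdefault/append), extracting the three categories afterwards (last 5-match for C_CO2); atoms of length < 2, on which A raises IndexError, are excluded by Pre_.
import Mathlib
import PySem

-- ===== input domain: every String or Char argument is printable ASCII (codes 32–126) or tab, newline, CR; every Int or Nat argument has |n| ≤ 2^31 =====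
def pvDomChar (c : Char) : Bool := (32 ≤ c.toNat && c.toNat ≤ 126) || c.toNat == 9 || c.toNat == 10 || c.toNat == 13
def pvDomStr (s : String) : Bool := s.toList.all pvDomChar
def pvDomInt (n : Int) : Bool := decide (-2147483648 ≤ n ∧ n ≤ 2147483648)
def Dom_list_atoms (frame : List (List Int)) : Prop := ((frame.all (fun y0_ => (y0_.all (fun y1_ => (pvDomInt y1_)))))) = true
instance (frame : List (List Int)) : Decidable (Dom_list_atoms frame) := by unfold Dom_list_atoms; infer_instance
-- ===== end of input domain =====

-- B replaces A's per-category if-branches by a branch-free grouping dict pass; equal results on frames whose atoms have length ≥ 2.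

-- ===== PORT A =====
-- one loop; per-atom branches in A's order; atom[1] via pyGet? (none = IndexError, excluded by Pre_)
def list_atoms (frame : List (List Int)) : List (List Int) × Option (List Int) × List (List Int) :=
  frame.foldl
    (fun st atom =>
      match PySem.List.pyGet? atom 1 with
      | none => st   -- Python raises IndexError here; outside Pre_list_atoms
      | some z =>
        let o := if z = 6 then st.1 ++ [atom] else st.1
        let c := if z = 5 then some atom else st.2.1
        let m := if z = 1 then st.2.2 ++ [atom] else st.2.2
        (o, c, m))
    ([], none, [])

-- ===== PORT B =====
-- grouping dict keyed by atom[1]: setdefault(k, []).append(atom) = modify k [] (· ++ [atom]); then extraction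
def list_atoms_alt (frame : List (List Int)) : List (List Int) × Option (List Int) × List (List Int) :=
  let groups : PySem.Dict Int (List (List Int)) :=
    frame.foldl
      (fun d atom =>
        match PySem.List.pyGet? atom 1 with
        | none => d   -- Python raises IndexError here; outside Pre_list_atoms
        | some z => d.modify z [] (· ++ [atom]))
      PySem.Dict.empty
  (groups.getD 6 [],
   if groups.contains 5 then PySem.List.pyGet? (groups.getD 5 []) (-1) |>.getD [] |> some else none,
   groups.getD 1 [])

-- ===== PRECONDITION & SPEC =====
-- Pre_ excludes frames containing an atom of length < 2, on which A raises IndexError at atom[1].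
def Pre_list_atoms (frame : List (List Int)) : Prop := ∀ atom ∈ frame, 2 ≤ atom.length
instance (frame : List (List Int)) : Decidable (Pre_list_atoms frame) := by unfold Pre_list_atoms; infer_instance
def pvWitness_list_atoms : List (List Int) := [[1, 6, 0], [2, 5], [3, 1], [4, 5], [5, 9]]
def Spec_list_atoms (frame : List (List Int)) (out : List (List Int) × Option (List Int) × List (List Int)) : Prop := out = list_atoms_alt frame
instance (frame : List (List Int)) (out : List (List Int) × Option (List Int) × List (List Int)) : Decidable (Spec_list_atoms frame out) := by unfold Spec_list_atoms; infer_instance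

-- ===== CLAIM (what is proved, stated in full; the proofs are below) =====
def Claim_equal_list_atoms : Prop := ∀ (frame : List (List Int)), Dom_list_atoms frame → Pre_list_atoms frame → Spec_list_atoms frame (list_atoms frame)

-- ===== LEMMAS AND PROOFS =====

theorem getLast?_cons_or {α : Type} (a : α) (l : List α) :
    (a :: l).getLast? = l.getLast?.or (some a) := by
  induction l generalizing a with
  | nil => rfl
  | cons b t ih => rw [List.getLast?_cons_cons, ih b]; cases t.getLast? <;> rfl

-- A's fused loop computes the three filters (and last 5-match) directly.
theorem list_atoms_loop (frame : List (List Int)) (h : ∀ atom ∈ frame, 2 ≤ atom.length)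
    (o m : List (List Int)) (c : Option (List Int)) :
    frame.foldl
      (fun st atom =>
        match PySem.List.pyGet? atom 1 with
        | none => st
        | some z =>
          let o := if z = 6 then st.1 ++ [atom] else st.1
          let c := if z = 5 then some atom else st.2.1
          let m := if z = 1 then st.2.2 ++ [atom] else st.2.2
          (o, c, m))
      (o, c, m)
    = (o ++ frame.filter (fun atom => decide (PySem.List.pyGet? atom 1 = some 6)),
       ((frame.filter (fun atom => decide (PySem.List.pyGet? atom 1 = some 5))).getLast?).or c,
       m ++ frame.filter (fun atom => decide (PySem.List.pyGet? atom 1 = some 1))) := by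
  induction frame generalizing o c m with
  | nil => simp
  | cons atom rest ih =>
    have hl : 2 ≤ atom.length := h atom (List.mem_cons_self ..)
    obtain ⟨x, hx⟩ : ∃ x, PySem.List.pyGet? atom 1 = some x := by
      match atom, hl with
      | a0 :: a1 :: t, _ => exact ⟨a1, by simp [PySem.List.pyGet?, PySem.List.pyIdx?]⟩
    have hrest : ∀ a ∈ rest, 2 ≤ a.length := fun a ha => h a (List.mem_cons_of_mem _ ha)
    simp only [List.foldl_cons, hx, List.filter_cons]
    rw [ih hrest]
    by_cases h6 : x = 6 <;> by_cases h5 : x = 5 <;> by_cases h1 : x = 1 <;>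
      simp_all [getLast?_cons_or]

-- B's grouping loop: looking up key c in the dict gives the filter for c.
theorem groups_getD (frame : List (List Int)) (d : PySem.Dict Int (List (List Int))) (c : Int) :
    (frame.foldl
      (fun d atom =>
        match PySem.List.pyGet? atom 1 with
        | none => d
        | some z => d.modify z [] (· ++ [atom]))
      d).getD c []
    = d.getD c [] ++ frame.filter (fun atom => decide (PySem.List.pyGet? atom 1 = some c)) := by
  induction frame generalizing d with
  | nil => simp
  | cons atom rest ih =>
    simp only [List.foldl_cons, List.filter_cons]
    cases hx : PySem.List.pyGet? atom 1 with
    | none => simp [ih]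
    | some z =>
      rw [ih]
      simp only [PySem.Dict.getD_modify]
      by_cases hzc : c = z
      · simp [hzc]
      · have hzc' : ¬z = c := fun h => hzc h.symm
        simp [hzc, hzc']

-- B's grouping loop: key c is present iff it was before or some atom has that number.
theorem groups_contains (frame : List (List Int)) (d : PySem.Dict Int (List (List Int))) (c : Int) :
    (frame.foldl
      (fun d atom =>
        match PySem.List.pyGet? atom 1 with
        | none => d
        | some z => d.modify z [] (· ++ [atom]))
      d).contains c
    = (d.contains c || frame.any (fun atom => decide (PySem.List.pyGet? atom 1 = some c))) := by
  induction frame generalizing d with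
  | nil => simp
  | cons atom rest ih =>
    simp only [List.foldl_cons, List.any_cons]
    cases hx : PySem.List.pyGet? atom 1 with
    | none => simp [ih]
    | some z =>
      rw [ih]
      simp only [PySem.Dict.contains_modify]
      by_cases hzc : c = z
      · simp [hzc]
      · have hzc' : ¬z = c := fun h => hzc h.symm
        cases d.contains c <;> simp [hzc, hzc']

theorem pyGet?_neg_one_of_ne_nil {α : Type} (l : List α) (h : l ≠ []) :
    PySem.List.pyGet? l (-1) = l.getLast? := by
  have hl : 1 ≤ l.length := List.length_pos_of_ne_nil h
  simp [PySem.List.pyGet?, PySem.List.pyIdx?, List.getLast?_eq_getElem?, hl]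

theorem any_eq_not_isEmpty_filter {α : Type} (l : List α) (p : α → Bool) :
    l.any p = !(l.filter p).isEmpty := by
  induction l with
  | nil => rfl
  | cons a t ih => by_cases h : p a <;> simp [h, ih]

-- ===== VERDICT (by name: the statement is the Claim_ definition above) =====
theorem list_atoms_spec : Claim_equal_list_atoms := by
  intro frame _ hpre
  unfold Spec_list_atoms list_atoms list_atoms_alt
  rw [list_atoms_loop frame hpre]
  simp only [groups_getD, groups_contains, PySem.Dict.getD_empty, PySem.Dict.contains_empty,
    Bool.false_or, List.nil_append, Option.or_none]
  simp only [Prod.mk.injEq]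
  refine ⟨by trivial, ?_, by trivial⟩
  rw [any_eq_not_isEmpty_filter]
  by_cases h5 : frame.filter (fun atom => decide (PySem.List.pyGet? atom 1 = some 5)) = []
  · simp [h5]
  · rw [pyGet?_neg_one_of_ne_nil _ h5]
    simp [h5]
    cases hfind : List.find? (fun atom => decide (PySem.List.pyGet? atom 1 = some 5)) frame.reverse with
    | some a => simp
    | none =>
      refine absurd (List.filter_eq_nil_iff.mpr ?_) h5
      intro x hx
      simpa using List.find?_eq_none.mp hfind x (List.mem_reverse.mpr hx)
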